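-- pv_equiv track=rewrite | github.com/fbuljan/advent-of-code-2025 | day3/second.py | find_max_in_string
-- ===== SOURCE A (Python) =====
-- def find_max_in_string(s: str):
--     if not s:
--         return None, []
--     max_digit = s[0]
--     max_ids = [0]
--     for i, ch in enumerate(s[1:], start=1):
--         if ch > max_digit:
--             max_digit = ch
--             max_ids = [i]
--         elif ch == max_digit:
--             max_ids.append(i)
--     return max_digit, max_ids
-- ===== SOURCE B (Python) =====
-- def find_max_in_string(s: str):
--     if not s:
--         return None, []
--     max_digit = max(s)
--     max_ids = [i for i, ch in enumerate(s) if ch == max_digit]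
--     return max_digit, max_ids
-- ===== Notes on version B (the rewrite author's own statement) =====
-- stated objective: idiomatic
-- what changed: Replaces the single running-max-with-reset loop by a two-pass decomposition: max(s) first, then a comprehension collecting all indices of that character.
import Mathlib
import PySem

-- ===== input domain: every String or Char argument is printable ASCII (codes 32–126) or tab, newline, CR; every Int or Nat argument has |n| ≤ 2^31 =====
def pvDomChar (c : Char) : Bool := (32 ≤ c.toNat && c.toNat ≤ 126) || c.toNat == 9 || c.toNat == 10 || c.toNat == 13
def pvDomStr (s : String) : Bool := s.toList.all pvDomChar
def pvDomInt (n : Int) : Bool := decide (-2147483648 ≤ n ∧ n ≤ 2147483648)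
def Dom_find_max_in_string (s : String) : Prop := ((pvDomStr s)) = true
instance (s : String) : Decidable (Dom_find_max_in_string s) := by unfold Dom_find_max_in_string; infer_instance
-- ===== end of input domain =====

-- B replaces A's running-max-with-reset loop by an idiomatic two-pass decomposition (max, then index scan).


-- ===== PORT A =====
-- loop over enumerate(s[1:], start=1) with state (max_digit, max_ids)
def findMaxGo (m : Char) (ids : List Int) (i : Int) : List Char → Char × List Int
  | [] => (m, ids)
  | c :: rest =>
    if c > m then findMaxGo c [i] (i + 1) rest
    else if c = m then findMaxGo m (ids ++ [i]) (i + 1) rest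
    else findMaxGo m ids (i + 1) rest

def find_max_in_string (s : String) : Option String × List Int :=
  match s.toList with
  | [] => (none, [])
  | h :: t =>
    let r := findMaxGo h [0] 1 t
    (some (String.ofList [r.1]), r.2)

-- ===== PORT B =====
-- max(s): Python's max over an iterable = fold keeping the current value unless strictly greater
def pyMaxChar (h : Char) (t : List Char) : Char :=
  t.foldl (fun a c => if c > a then c else a) h

def find_max_in_string_alt (s : String) : Option String × List Int :=
  match s.toList with
  | [] => (none, [])
  | h :: t =>
    let M := pyMaxChar h t
    (some (String.ofList [M]),
      (PySem.List.enumerate (h :: t) 0).filterMap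
        (fun p => if p.2 = M then some p.1 else none))

-- ===== PRECONDITION & SPEC =====
def Spec_find_max_in_string (s : String) (out : Option String × List Int) : Prop := out = find_max_in_string_alt s
instance (s : String) (out : Option String × List Int) : Decidable (Spec_find_max_in_string s out) := by unfold Spec_find_max_in_string; infer_instance

-- ===== CLAIM (what is proved, stated in full; the proofs are below) =====
def Claim_equal_find_max_in_string : Prop := ∀ (s : String), Dom_find_max_in_string s → Spec_find_max_in_string s (find_max_in_string s)

-- ===== LEMMAS AND PROOFS =====

-- proof-side index list: positions (from i) of M in the list
def posOf (M : Char) (i : Int) : List Char → List Int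
  | [] => []
  | c :: rest => (if c = M then [i] else []) ++ posOf M (i + 1) rest

theorem filterMap_enumerate_eq_posOf (M : Char) (cs : List Char) (i : Int) :
    (PySem.List.enumerate cs i).filterMap (fun p => if p.2 = M then some p.1 else none)
      = posOf M i cs := by
  induction cs generalizing i with
  | nil => simp [PySem.List.enumerate_nil, posOf]
  | cons c rest ih =>
    simp only [PySem.List.enumerate_cons, List.filterMap_cons, posOf]
    by_cases h : c = M <;> simp [h, ih]

theorem le_pyMaxChar (h : Char) (t : List Char) : h ≤ pyMaxChar h t := by
  induction t generalizing h with
  | nil => simp [pyMaxChar]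
  | cons c rest ih =>
    simp only [pyMaxChar, List.foldl_cons]
    by_cases hc : c > h
    · simp only [hc, if_pos]
      exact le_of_lt (lt_of_lt_of_le hc (ih c))
    · simp only [hc, if_neg, not_false_iff]
      exact ih h

theorem if_char_comm {α : Type} (a b : Char) (x y : α) :
    (if a = b then x else y) = (if b = a then x else y) := by
  by_cases h : a = b
  · simp [h]
  · simp [h, Ne.symm h]

theorem findMaxGo_eq (t : List Char) (m : Char) (ids : List Int) (i : Int) :
    findMaxGo m ids i t
      = (pyMaxChar m t,
         (if pyMaxChar m t = m then ids else []) ++ posOf (pyMaxChar m t) i t) := by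
  induction t generalizing m ids i with
  | nil => simp [findMaxGo, pyMaxChar, posOf]
  | cons c rest ih =>
    have hcons : pyMaxChar m (c :: rest) = pyMaxChar (if c > m then c else m) rest := rfl
    simp only [findMaxGo]
    by_cases hc : c > m
    · rw [if_pos hc, ih, hcons, if_pos hc]
      have hM : m < pyMaxChar c rest := lt_of_lt_of_le hc (le_pyMaxChar c rest)
      rw [if_neg hM.ne']
      simp only [posOf, List.nil_append]
      rw [if_char_comm]
    · rw [if_neg hc]
      by_cases he : c = m
      · subst he
        rw [if_pos rfl, ih, hcons, if_neg hc]
        simp only [posOf]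
        by_cases hM : pyMaxChar c rest = c
        · simp [hM]
        · simp [hM]
          exact fun e => hM (Eq.symm e)
      · rw [if_neg he, ih, hcons, if_neg hc]
        have hlt : c < pyMaxChar m rest :=
          lt_of_lt_of_le (lt_of_le_of_ne (le_of_not_gt hc) he) (le_pyMaxChar m rest)
        simp only [posOf]
        simp [hlt.ne]

-- ===== VERDICT (by name: the statement is the Claim_ definition above) =====
theorem find_max_in_string_spec : Claim_equal_find_max_in_string := by
  intro s _
  unfold Spec_find_max_in_string find_max_in_string find_max_in_string_alt
  cases hs : s.toList with
  | nil => rfl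
  | cons h t =>
    simp only [findMaxGo_eq, filterMap_enumerate_eq_posOf, posOf]
    by_cases hM : pyMaxChar h t = h
    · simp [hM]
    · have : h ≠ pyMaxChar h t := fun e => hM e.symm
      simp [hM, this]
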